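-- pv_equiv track=rewrite | github.com/diyorbekbaxromovv/Python-5-month-NT | 7-lesson selection sort/homework/ex3.py | unique_num
-- ===== SOURCE A (Python) =====
-- def unique_num(numl):
--     digit_count = {}
--     for i in numl:
--         if isinstance(i, int) and 0 <= i <= 9:
--             digit_count[i] = digit_count.get(i, 0) + 1
--     for digit, count in digit_count.items():
--         if count == 1:
--             return digit
--     return None
-- ===== SOURCE B (Python) =====
-- def unique_num(numl):
--     # Single pass, no counting: keep the digits seen exactly once so far (in
--     # first-seen order) in `once`; on a repeat, delete the digit from `once`
--     # and remember it in `repeated` so later occurrences are ignored.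
--     once = []
--     repeated = set()
--     for i in numl:
--         if isinstance(i, int) and 0 <= i <= 9:
--             if i in repeated:
--                 continue
--             if i in once:
--                 once.remove(i)
--                 repeated.add(i)
--             else:
--                 once.append(i)
--     return once[0] if once else None
-- ===== Notes on version B (the rewrite author's own statement) =====
-- stated objective: alternative
-- what changed: B keeps no counts at all: one pass maintains a queue of digits seen exactly once (deleting a digit on its second occurrence and blacklisting it in a 'repeated' set) and returns the queue's head, instead of A's build-a-count-table pass followed by a scan of the table's items.
import Mathlib
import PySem

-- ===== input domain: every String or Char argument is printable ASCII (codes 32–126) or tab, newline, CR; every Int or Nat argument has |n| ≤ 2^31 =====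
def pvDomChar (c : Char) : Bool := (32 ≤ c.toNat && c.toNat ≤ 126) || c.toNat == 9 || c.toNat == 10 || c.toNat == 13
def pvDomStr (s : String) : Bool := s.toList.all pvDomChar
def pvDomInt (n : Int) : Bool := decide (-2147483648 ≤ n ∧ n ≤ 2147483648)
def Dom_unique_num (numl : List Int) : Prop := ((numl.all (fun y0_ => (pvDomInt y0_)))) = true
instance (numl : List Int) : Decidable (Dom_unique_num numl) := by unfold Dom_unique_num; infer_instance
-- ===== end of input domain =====

-- B keeps no count table: a single pass maintains the queue of digits seen exactly once (removing a digit on its second occurrence) and returns its head (alternative decomposition, same results).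


-- ===== PORT A =====
-- loop 1: build digit_count; loop 2: scan items for the first count == 1
def unique_num (numl : List Int) : Option Int :=
  let digit_count : PySem.Dict Int Int :=
    numl.foldl (fun d i => if 0 ≤ i ∧ i ≤ 9 then d.insert i (d.getD i 0 + 1) else d)
      PySem.Dict.empty
  (digit_count.items.find? (fun p => p.2 == 1)).map Prod.fst

-- ===== PORT B =====
-- the guarded part of B's loop body: st = (once, repeated)
def uniqueBody (st : List Int × PySem.Set Int) (i : Int) : List Int × PySem.Set Int :=
  if PySem.Set.contains st.2 i then st
  else if st.1.contains i then
    -- `once.remove(i)`: i ∈ once is guaranteed by the branch, so getD never defaults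
    ((PySem.List.remove? st.1 i).getD st.1, PySem.Set.add st.2 i)
  else (st.1 ++ [i], st.2)

def unique_num_alt (numl : List Int) : Option Int :=
  (numl.foldl (fun st i => if 0 ≤ i ∧ i ≤ 9 then uniqueBody st i else st)
    ([], PySem.Set.empty)).1.head?

-- ===== PRECONDITION & SPEC =====
def Spec_unique_num (numl : List Int) (out : Option Int) : Prop := out = unique_num_alt numl
instance (numl : List Int) (out : Option Int) : Decidable (Spec_unique_num numl out) := by unfold Spec_unique_num; infer_instance

-- ===== CLAIM =====
def Claim_equal_unique_num : Prop := ∀ (numl : List Int), Dom_unique_num numl → Spec_unique_num numl (unique_num numl)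

-- ===== LEMMAS AND PROOFS =====

-- a conditionally-updating fold is the fold over the filtered list
theorem foldl_if_eq_foldl_filter {α β : Type} (p : α → Bool) (g : β → α → β) :
    ∀ (l : List α) (init : β),
      l.foldl (fun d x => if p x then g d x else d) init = (l.filter p).foldl g init := by
  intro l
  induction l with
  | nil => intro init; rfl
  | cons x xs ih =>
    intro init
    by_cases h : p x
    · simp [h, ih]
    · simp [h, ih]

-- switching the predicate off at one element a of a nodup list erases a from the filter
theorem filter_turnoff_eq_erase {α : Type} [DecidableEq α] (p : α → Bool) (a : α) :
    ∀ (K : List α), K.Nodup →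
      K.filter (fun x => p x && !(x == a)) = (K.filter p).erase a := by
  intro K
  induction K with
  | nil => intro _; rfl
  | cons k ks ih =>
    intro hnd
    rcases List.nodup_cons.mp hnd with ⟨hka, hnd'⟩
    by_cases hk : k = a
    · subst hk
      have hcong : List.filter (fun x => p x && !(x == k)) ks = List.filter p ks := by
        apply List.filter_congr
        intro x hx
        have hxk : (x == k) = false := by
          simp only [beq_eq_false_iff_ne]
          exact fun h => hka (h ▸ hx)
        simp [hxk]
      by_cases hpa : p k
      · simp [hpa, hcong]
      · have hnm : k ∉ List.filter p ks := fun hmem => hka (List.mem_of_mem_filter hmem)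
        simp [hpa, hcong, List.erase_of_not_mem hnm]
    · have hne : (k == a) = false := by simp [hk]
      by_cases hpk : p k
      · simp [hpk, hne, ih hnd',
          List.erase_cons_tail (show ¬ (k == a) = true by simp [hk])]
      · simp [hpk, ih hnd']

-- the fold invariant over the filtered list fl:
-- once = the keys of fl with count 1, in first-occurrence order; repeated ↔ count ≥ 2
theorem uniqueBody_invariant :
    ∀ (fl : List Int),
      (fl.foldl uniqueBody ([], PySem.Set.empty)).1
          = (PySem.Set.ofList fl).filter (fun k => fl.count k == 1)
        ∧ ∀ x : Int, ((fl.foldl uniqueBody ([], PySem.Set.empty)).2.contains x = true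
            ↔ x ∈ fl ∧ 2 ≤ fl.count x) := by
  intro fl
  induction fl using List.reverseRecOn with
  | nil =>
    constructor
    · rfl
    · intro x; simp [PySem.Set.empty, PySem.Set.contains]
  | append_singleton fl a ih =>
    obtain ⟨h1, h2⟩ := ih
    rw [List.foldl_append]
    set st := fl.foldl uniqueBody ([], PySem.Set.empty) with hst
    have hmem2 : ∀ x : Int, x ∈ st.2 ↔ x ∈ fl ∧ 2 ≤ fl.count x :=
      fun x => (PySem.Set.contains_iff st.2 x).symm.trans (h2 x)
    have hK : PySem.Set.ofList (fl ++ [a]) = PySem.Set.add (PySem.Set.ofList fl) a :=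
      PySem.Set.ofList_append_singleton fl a
    rcases Nat.lt_or_ge (fl.count a) 2 with hlt | hc2
    · rcases Nat.lt_or_ge (fl.count a) 1 with hlt0 | hc1
      · -- count = 0 : a is new, appended to once
        have hc0 : fl.count a = 0 := by omega
        have hamem : a ∉ fl := List.count_eq_zero.mp hc0
        have hrep : st.2.contains a = false := by
          rw [Bool.eq_false_iff]
          intro h
          exact hamem ((h2 a).mp h).1
        have honce : st.1.contains a = false := by
          rw [Bool.eq_false_iff]
          intro h
          have := List.mem_of_mem_filter (h1 ▸ (List.contains_iff_mem.mp h))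
          exact hamem ((PySem.Set.mem_ofList fl _).mp this)
        simp only [List.foldl_cons, List.foldl_nil, uniqueBody, hrep, honce,
          Bool.false_eq_true, if_false]
        constructor
        · rw [hK, PySem.Set.add_of_not_mem (fun h => hamem ((PySem.Set.mem_ofList fl _).mp h)),
            List.filter_append, h1]
          have hcong : ∀ k ∈ PySem.Set.ofList fl,
              ((fl ++ [a]).count k == 1) = (fl.count k == 1) := by
            intro k hk
            have hkfl : k ∈ fl := (PySem.Set.mem_ofList fl _).mp hk
            have hkne : a ≠ k := fun h => hamem (h ▸ hkfl)
            simp [List.count_append, hkne]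
          rw [List.filter_congr hcong]
          simp [List.count_append, hc0]
        · intro x
          rw [h2 x]
          by_cases hxa : x = a
          · subst hxa
            simp [hamem, List.count_append, hc0]
          · simp [List.count_append, List.mem_append, hxa, Ne.symm hxa]
      · -- count = 1 : a moves from once to repeated
        have hc1' : fl.count a = 1 := by omega
        have hamem : a ∈ fl := List.count_pos_iff.mp (by omega)
        have hrep : st.2.contains a = false := by
          rw [Bool.eq_false_iff]
          intro h
          have := ((h2 a).mp h).2
          omega
        have haonce : a ∈ st.1 := by
          rw [h1]
          exact List.mem_filter.mpr ⟨(PySem.Set.mem_ofList fl _).mpr hamem, by simp [hc1']⟩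
        have honce : st.1.contains a = true := List.contains_iff_mem.mpr haonce
        simp only [List.foldl_cons, List.foldl_nil, uniqueBody, hrep, honce,
          Bool.false_eq_true, if_false, if_true,
          PySem.List.remove?_eq_some_erase st.1 a haonce, Option.getD_some]
        constructor
        · rw [hK, PySem.Set.add_of_mem ((PySem.Set.mem_ofList fl _).mpr hamem), h1]
          have hcong : ∀ k ∈ PySem.Set.ofList fl,
              ((fl ++ [a]).count k == 1)
                = ((fl.count k == 1) && !(k == a)) := by
            intro k _
            by_cases hka : k = a
            · subst hka
              simp [List.count_append, hc1']
            · simp only [List.count_append, List.count_singleton]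
              simp [Ne.symm hka, hka]
          rw [List.filter_congr hcong,
            filter_turnoff_eq_erase (fun k => fl.count k == 1) a _ (PySem.Set.nodup_ofList fl)]
        · intro x
          rw [PySem.Set.contains_iff _ x, PySem.Set.mem_add, hmem2 x]
          by_cases hxa : x = a
          · subst hxa
            simp [hamem, List.count_append, hc1']
          · simp [List.count_append, List.mem_append, hxa, Ne.symm hxa]
    · -- count ≥ 2 : a is already in repeated, nothing changes
      have hamem : a ∈ fl := List.count_pos_iff.mp (by omega)
      have hrep : st.2.contains a = true := (h2 a).mpr ⟨hamem, hc2⟩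
      simp only [List.foldl_cons, List.foldl_nil, uniqueBody, hrep, if_true]
      constructor
      · rw [hK, PySem.Set.add_of_mem ((PySem.Set.mem_ofList fl _).mpr hamem), h1]
        apply Eq.symm
        apply List.filter_congr
        intro k _
        by_cases hka : k = a
        · have hL : ((fl ++ [a]).count k == 1) = false := by
            subst hka; simp [List.count_append]; omega
          have hR : (fl.count k == 1) = false := by
            subst hka; simp; omega
          rw [hL, hR]
        · simp [List.count_append, Ne.symm hka]
      · intro x
        rw [h2 x]
        by_cases hxa : x = a
        · subst hxa
          constructor
          · intro _
            refine ⟨List.mem_append_left _ hamem, ?_⟩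
            simp [List.count_append]
            omega
          · intro _; exact ⟨hamem, hc2⟩
        · simp [List.count_append, List.mem_append, hxa, Ne.symm hxa]

theorem unique_num_eq_alt (numl : List Int) : unique_num numl = unique_num_alt numl := by
  unfold unique_num unique_num_alt
  have hguard : ∀ (i : Int), (decide (0 ≤ i ∧ i ≤ 9) : Bool) = decide (0 ≤ i ∧ i ≤ 9) := fun _ => rfl
  set fl := numl.filter (fun i => decide (0 ≤ i ∧ i ≤ 9)) with hfl
  -- A's first loop builds Counter(fl)
  have hfoldA :
      numl.foldl (fun d i => if 0 ≤ i ∧ i ≤ 9 then d.insert i (d.getD i 0 + 1) else d)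
        PySem.Dict.empty = PySem.Dict.counter fl := by
    have := foldl_if_eq_foldl_filter (fun i : Int => decide (0 ≤ i ∧ i ≤ 9))
      (fun (d : PySem.Dict Int Int) i => d.insert i (d.getD i 0 + 1)) numl PySem.Dict.empty
    simp only [decide_eq_true_eq] at this
    rw [this, ← hfl, PySem.Dict.foldl_insert_getD_add_one_eq_counter]
  -- B's loop runs uniqueBody over fl
  have hfoldB :
      numl.foldl (fun st i => if 0 ≤ i ∧ i ≤ 9 then uniqueBody st i else st)
        ([], PySem.Set.empty) = fl.foldl uniqueBody ([], PySem.Set.empty) := by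
    have := foldl_if_eq_foldl_filter (fun i : Int => decide (0 ≤ i ∧ i ≤ 9))
      uniqueBody numl ([], PySem.Set.empty)
    simp only [decide_eq_true_eq] at this
    rw [this, ← hfl]
  rw [hfoldA, hfoldB, (uniqueBody_invariant fl).1]
  simp only [PySem.Dict.items_counter, List.find?_map]
  have hcomp : ((fun p : Int × Int => p.2 == 1) ∘ fun k => (k, (fl.count k : Int)))
      = fun k => ((fl.count k : Int) == 1) := rfl
  rw [hcomp, ← List.head?_filter]
  have hpred : (fun k : Int => ((fl.count k : Int) == 1)) = fun k => (fl.count k == 1) := by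
    funext k
    by_cases h : fl.count k = 1 <;> simp [h]
  rw [hpred]
  cases (PySem.Set.ofList fl).filter (fun k => fl.count k == 1) <;> rfl

-- ===== VERDICT =====
theorem unique_num_spec : Claim_equal_unique_num := by
  intro numl _
  unfold Spec_unique_num
  exact unique_num_eq_alt numl
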